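-- pv_equiv track=rewrite | github.com/Fuhii/algorithmic-problem | main.py | markDiagonals
-- ===== SOURCE A (Python) =====
-- from enum import Enum
--
-- class State(Enum):
--   BLANK = 0
--   WHITE = 1
--   BlACK = 2
--   PUTBLACK = 3
--   BOARDROW = 8
--
-- def checkAndMarkRow(board):
--   # ある配列の要素が２である時それよりあとの要素に１が続いておりその後０が現れた場所を３に置き換える処理
--   n = len(board)
--   for j in range(n):
--       if board[j] == State.BlACK.value:
--         currentIndex = j
--         while currentIndex != n-1 and board[currentIndex+1] == State.WHITE.value:
--             currentIndex += 1
--         if currentIndex != n-1 and currentIndex != j: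
--           board[currentIndex+1] = State.PUTBLACK.value
--   # 配列を逆順にして同様にして３に置き換える処理
--   for h in range(n):
--     if board[h] == State.BlACK.value:
--       currentIndexReverse = h
--       while currentIndexReverse != 0 and board[currentIndexReverse-1] == State.WHITE.value:
--         currentIndexReverse -= 1
--       if currentIndexReverse != 0 and currentIndexReverse != h:
--         board[currentIndexReverse-1] = State.PUTBLACK.value
--   return board
--
-- def markDiagonals(board):
--   # 二重配列の右下→左上の斜めの要素を取得し３に置き換える処理
--   # iは対角線の数を表しhはその対角線に含まれる要素の数を表す。
--   n = len(board)
--   for i in range(1-n, n):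
--     diagonal = []
--     for h in range(n-abs(i)):
--       diagonal.append(board[max(0, -i)+h][max(0, i)+h])
--     markedDiagonal = checkAndMarkRow(diagonal)
--     # ３をおける場所のindexを特定して置き換える処理
--     for j in range(len(markedDiagonal)):
--       if markedDiagonal[j] == State.PUTBLACK.value:
--         board[max(0, -i)+j][max(0, i)+j] = State.PUTBLACK.value
--
--   # 二重配列の左下→右上の斜めの要素を取得し３に置き換える処理
--   for i in range(1-n, n):
--     diagonal = []
--     for h in range(n-abs(i)):
--       diagonal.append(board[max(0, i)+h][min(n+i, n)-h-1])
--     markedDiagonal = checkAndMarkRow(diagonal)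
--     for j in range(len(markedDiagonal)):
--       if markedDiagonal[j] == State.PUTBLACK.value:
--         board[max(0, i)+j][min(n+i, n)-j-1] = State.PUTBLACK.value
--   return board
-- ===== SOURCE B (Python) =====
-- # Single-pass run scans along each diagonal in place of checkAndMarkRow's nested rescans.
-- # Mutates `board` in place (like the original) and returns it.
-- WHITE = 1
-- BLACK = 2
-- PUTBLACK = 3
--
-- def markDiagonals(board):
--   n = len(board)
--
--   def scan(coords, restart_on_black):
--     # One linear pass over the cells at `coords`, keeping a run state:
--     # `active` = a black started a run, `whites` = whites seen since then.
--     active = False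
--     whites = 0
--     for (r, c) in coords:
--       v = board[r][c]
--       if v == WHITE:
--         if active:
--           whites += 1
--       elif active and whites > 0:
--         board[r][c] = PUTBLACK
--         active = restart_on_black and v == BLACK
--         whites = 0
--       elif v == BLACK:
--         active = True
--         whites = 0
--       else:
--         active = False
--         whites = 0
--
--   for i in range(1 - n, n):
--     coords = [(max(0, -i) + h, max(0, i) + h) for h in range(n - abs(i))]
--     scan(coords, False)
--     scan(list(reversed(coords)), True)
--
--   for i in range(1 - n, n):
--     coords = [(max(0, i) + h, min(n + i, n) - h - 1) for h in range(n - abs(i))]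
--     scan(coords, False)
--     scan(list(reversed(coords)), True)
--
--   return board
-- ===== Notes on version B (the rewrite author's own statement) =====
-- stated objective: alternative
-- what changed: checkAndMarkRow's per-black while-loop rescans are replaced by a single linear run-scan (state: active run + white count) over each diagonal, done in place on the board via coordinate lists instead of extract-mark-copy-back.
import Mathlib
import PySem

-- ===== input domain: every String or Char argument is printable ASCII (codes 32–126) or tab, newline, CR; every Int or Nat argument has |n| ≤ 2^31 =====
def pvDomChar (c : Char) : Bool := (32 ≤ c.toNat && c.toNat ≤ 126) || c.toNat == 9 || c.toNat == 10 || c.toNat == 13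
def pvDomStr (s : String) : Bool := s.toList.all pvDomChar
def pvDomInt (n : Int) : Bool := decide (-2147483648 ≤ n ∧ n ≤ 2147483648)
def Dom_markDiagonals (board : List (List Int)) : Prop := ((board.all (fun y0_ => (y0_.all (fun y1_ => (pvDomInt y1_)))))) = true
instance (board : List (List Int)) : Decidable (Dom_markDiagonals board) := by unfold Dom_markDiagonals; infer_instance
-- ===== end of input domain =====

-- B replaces checkAndMarkRow's nested while-rescans by single linear run-scans along each
-- diagonal, done in place on the board (both A and B mutate `board` in Python; the theorem
-- is about the returned value, which is the same object).

-- ===== PORT A =====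
-- board[r][c] read / write (under Pre_ every used index is in range, so getD/set defaults never fire)
def pvGet2 (b : List (List Int)) (r c : Nat) : Int := (b.getD r []).getD c 0

def pvSet2 (b : List (List Int)) (r c : Nat) (v : Int) : List (List Int) :=
  b.set r ((b.getD r []).set c v)

-- the inner `while` loops of checkAndMarkRow; fuel n never exhausts (cur moves at most n steps)
def pvWalkF (b : List Int) (n : Nat) : Nat → Nat → Nat
  | 0, cur => cur
  | fuel+1, cur => if cur ≠ n - 1 ∧ b.getD (cur+1) 0 = 1 then pvWalkF b n fuel (cur+1) else cur

def pvWalkB (b : List Int) : Nat → Nat → Nat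
  | 0, cur => cur
  | fuel+1, cur => if cur ≠ 0 ∧ b.getD (cur-1) 0 = 1 then pvWalkB b fuel (cur-1) else cur

-- `for j in range(n): …` (first loop of checkAndMarkRow)
def pvFwdGo (n : Nat) (j : Nat) (b : List Int) : List Int :=
  if _h : j < n then
    pvFwdGo n (j+1)
      (if b.getD j 0 = 2 then
        let cur := pvWalkF b n n j
        if cur ≠ n - 1 ∧ cur ≠ j then b.set (cur+1) 3 else b
      else b)
  else b
termination_by n - j

-- `for h in range(n): …` (second loop of checkAndMarkRow)
def pvBwdGo (n : Nat) (h : Nat) (b : List Int) : List Int :=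
  if _h : h < n then
    pvBwdGo n (h+1)
      (if b.getD h 0 = 2 then
        let cur := pvWalkB b n h
        if cur ≠ 0 ∧ cur ≠ h then b.set (cur-1) 3 else b
      else b)
  else b
termination_by n - h

def checkAndMarkRow (b : List Int) : List Int :=
  let n := b.length
  pvBwdGo n 0 (pvFwdGo n 0 b)

-- one iteration of the first diagonal sweep of markDiagonals
def pvStepA1 (n : Nat) (board : List (List Int)) (i : Int) : List (List Int) :=
  let diagonal := (List.range (n - i.natAbs)).map
      (fun h => pvGet2 board ((max 0 (-i)).toNat + h) ((max 0 i).toNat + h))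
  let marked := checkAndMarkRow diagonal
  (List.range marked.length).foldl
    (fun bd j => if marked.getD j 0 = 3 then
        pvSet2 bd ((max 0 (-i)).toNat + j) ((max 0 i).toNat + j) 3 else bd) board

-- one iteration of the second diagonal sweep of markDiagonals
def pvStepA2 (n : Nat) (board : List (List Int)) (i : Int) : List (List Int) :=
  let diagonal := (List.range (n - i.natAbs)).map
      (fun h => pvGet2 board ((max 0 i).toNat + h) ((min ((n:Int)+i) (n:Int)) - (h:Int) - 1).toNat)
  let marked := checkAndMarkRow diagonal
  (List.range marked.length).foldl
    (fun bd j => if marked.getD j 0 = 3 then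
        pvSet2 bd ((max 0 i).toNat + j) ((min ((n:Int)+i) (n:Int)) - (j:Int) - 1).toNat 3 else bd) board

def markDiagonals (board : List (List Int)) : List (List Int) :=
  let n := board.length
  let b1 := (PySem.List.pyRange (1 - (n:Int)) n 1).foldl (pvStepA1 n) board
  (PySem.List.pyRange (1 - (n:Int)) n 1).foldl (pvStepA2 n) b1

-- ===== PORT B =====
-- the linear `scan(coords, restart_on_black)` of Source B: one pass, state (active, whites)
def pvScanGo (restart : Bool) : List (Nat × Nat) → List (List Int) → Bool → Nat → List (List Int)
  | [], b, _, _ => b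
  | (r, c) :: t, b, active, whites =>
    let v := pvGet2 b r c
    if v = 1 then
      pvScanGo restart t b active (if active then whites + 1 else whites)
    else if active = true ∧ 0 < whites then
      pvScanGo restart t (pvSet2 b r c 3) (restart && decide (v = 2)) 0
    else if v = 2 then
      pvScanGo restart t b true 0
    else
      pvScanGo restart t b false 0

def pvCoords1 (n : Nat) (i : Int) : List (Nat × Nat) :=
  (List.range (n - i.natAbs)).map (fun h => ((max 0 (-i)).toNat + h, (max 0 i).toNat + h))

def pvCoords2 (n : Nat) (i : Int) : List (Nat × Nat) :=
  (List.range (n - i.natAbs)).map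
    (fun h => ((max 0 i).toNat + h, ((min ((n:Int)+i) (n:Int)) - (h:Int) - 1).toNat))

def pvStepB1 (n : Nat) (board : List (List Int)) (i : Int) : List (List Int) :=
  let coords := pvCoords1 n i
  pvScanGo true coords.reverse (pvScanGo false coords board false 0) false 0

def pvStepB2 (n : Nat) (board : List (List Int)) (i : Int) : List (List Int) :=
  let coords := pvCoords2 n i
  pvScanGo true coords.reverse (pvScanGo false coords board false 0) false 0

def markDiagonals_alt (board : List (List Int)) : List (List Int) :=
  let n := board.length
  let b1 := (PySem.List.pyRange (1 - (n:Int)) n 1).foldl (pvStepB1 n) board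
  (PySem.List.pyRange (1 - (n:Int)) n 1).foldl (pvStepB2 n) b1

-- ===== PRECONDITION & SPEC =====
-- Pre_ excludes ragged boards on which Python A raises IndexError: every row must have at
-- least `len(board)` entries (both sweeps index columns up to len(board)-1 in every row).
def Pre_markDiagonals (board : List (List Int)) : Prop :=
  ∀ row ∈ board, board.length ≤ row.length

instance (board : List (List Int)) : Decidable (Pre_markDiagonals board) := by
  unfold Pre_markDiagonals; infer_instance

def pvWitness_markDiagonals : List (List Int) := [[2, 1, 0], [0, 0, 0], [0, 0, 0]]

def Spec_markDiagonals (board : List (List Int)) (out : List (List Int)) : Prop := out = markDiagonals_alt board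
instance (board : List (List Int)) (out : List (List Int)) : Decidable (Spec_markDiagonals board out) := by unfold Spec_markDiagonals; infer_instance

-- ===== CLAIM (what is proved, stated in full; the proofs are below) =====
def Claim_equal_markDiagonals : Prop := ∀ (board : List (List Int)), Dom_markDiagonals board → Pre_markDiagonals board → Spec_markDiagonals board (markDiagonals board)

-- ===== LEMMAS AND PROOFS =====

-- pure one-pass scan on a value list (pvScanGo with the board reads/writes stripped out)
def pvSP (restart : Bool) : List Int → Bool → Nat → List Int
  | [], _, _ => []
  | v :: t, active, whites =>
    if v = 1 then v :: pvSP restart t active (if active then whites + 1 else whites)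
    else if active = true ∧ 0 < whites then 3 :: pvSP restart t (restart && decide (v = 2)) 0
    else if v = 2 then v :: pvSP restart t true 0
    else v :: pvSP restart t false 0

-- write the values `vs` at the coordinates `C`
def pvWAll : List (List Int) → List (Nat × Nat) → List Int → List (List Int)
  | b, [], _ => b
  | b, _ :: _, [] => b
  | b, (r, c) :: t, v :: vs => pvWAll (pvSet2 b r c v) t vs

def pvInB (b : List (List Int)) (p : Nat × Nat) : Prop :=
  p.1 < b.length ∧ p.2 < (b.getD p.1 []).length


theorem pvSP_length (rs : Bool) (l : List Int) : ∀ (a : Bool) (w : Nat),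
    (pvSP rs l a w).length = l.length := by
  induction l with
  | nil => intro a w; rfl
  | cons v t ih =>
    intro a w
    simp only [pvSP]
    split_ifs <;> simp [ih]

theorem sp_ones (rs : Bool) (k : Nat) : ∀ (a : Bool) (w : Nat),
    pvSP rs (List.replicate k 1) a w = List.replicate k 1 := by
  induction k with
  | zero => intro a w; rfl
  | succ k ih =>
    intro a w
    simp only [List.replicate_succ, pvSP]
    norm_num [ih]

theorem sp_head_agnostic (rs : Bool) (t : List Int)
    (h : t = [] ∨ t.getD 0 0 ≠ 1) :
    pvSP rs t true 0 = pvSP rs t false 0 := by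
  rcases h with h | h
  · subst h; rfl
  · cases t with
    | nil => rfl
    | cons v r =>
      simp only [List.getD_cons_zero] at h
      simp only [pvSP, if_neg h]
      norm_num

theorem sp_ones_term (rs : Bool) (v : Int) (r : List Int) (hv : v ≠ 1) :
    ∀ (k : Nat), 1 ≤ k → ∀ (w : Nat),
    pvSP rs (List.replicate k 1 ++ v :: r) true w
      = List.replicate k 1 ++ 3 :: pvSP rs r (rs && decide (v = 2)) 0 := by
  intro k
  induction k with
  | zero => omega
  | succ k ih =>
    intro _ w
    rcases Nat.eq_zero_or_pos k with hk0 | hk0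
    · subst hk0
      simp only [List.replicate_succ, List.replicate_zero, List.nil_append,
        List.cons_append, pvSP, if_neg hv]
      norm_num
    · simp only [List.replicate_succ, List.cons_append, pvSP]
      norm_num [ih hk0]

theorem ones_decomp (t : List Int) :
    ∃ k, t = List.replicate k 1 ∨ ∃ v r, v ≠ 1 ∧ t = List.replicate k 1 ++ v :: r := by
  induction t with
  | nil => exact ⟨0, Or.inl rfl⟩
  | cons x t ih =>
    by_cases hx : x = (1 : Int)
    · obtain ⟨k, hk | ⟨v, r, hv, hk⟩⟩ := ih
      · exact ⟨k + 1, Or.inl (by rw [hk, hx]; rfl)⟩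
      · exact ⟨k + 1, Or.inr ⟨v, r, hv, by rw [hk, hx]; rfl⟩⟩
    · exact ⟨0, Or.inr ⟨x, t, hx, rfl⟩⟩

theorem walkF_high (b : List Int) (n : Nat) :
    ∀ (fuel cur : Nat), n = b.length → n - 1 ≤ cur → pvWalkF b n fuel cur = cur := by
  intro fuel cur hn hcur
  cases fuel with
  | zero => rfl
  | succ f =>
    simp only [pvWalkF]
    rcases Nat.eq_or_lt_of_le hcur with hc | hc
    · rw [if_neg]; intro ⟨h1, _⟩; exact h1 hc.symm
    · rw [if_neg]; intro ⟨_, h2⟩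
      rw [List.getD_eq_getElem?_getD, List.getElem?_eq_none (by omega)] at h2
      norm_num at h2

theorem walkF_fuel (b : List Int) (n : Nat) (hn : n = b.length) :
    ∀ (f1 f2 cur : Nat), n - 1 - cur ≤ f1 → n - 1 - cur ≤ f2 →
    pvWalkF b n f1 cur = pvWalkF b n f2 cur := by
  intro f1
  induction f1 with
  | zero =>
    intro f2 cur h1 h2
    have : n - 1 ≤ cur := by omega
    rw [walkF_high b n 0 cur hn this, walkF_high b n f2 cur hn this]
  | succ f1 ih =>
    intro f2 cur h1 h2
    by_cases hcond : (cur ≠ n - 1 ∧ b.getD (cur + 1) 0 = 1)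
    · have hlt : cur < n - 1 := by
        by_contra hc
        push_neg at hc
        have hge : n ≤ cur := by omega
        have : b.getD (cur + 1) 0 = 0 := by
          rw [List.getD_eq_getElem?_getD, List.getElem?_eq_none (by omega)]; rfl
        rw [this] at hcond
        exact absurd hcond.2 (by norm_num)
      cases f2 with
      | zero => omega
      | succ f2 =>
        simp only [pvWalkF, if_pos hcond]
        exact ih f2 (cur+1) (by omega) (by omega)
    · cases f2 with
      | zero =>
        have hge : n - 1 ≤ cur := by
          by_contra hc; push_neg at hc; omega
        rw [walkF_high b n (f1+1) cur hn hge, walkF_high b n 0 cur hn hge]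
      | succ f2 => simp only [pvWalkF, if_neg hcond]

theorem walkF_run (b : List Int) :
    ∀ (k fuel cur : Nat), k ≤ fuel → cur + k + 1 ≤ b.length →
    (∀ t, t < k → b.getD (cur + 1 + t) 0 = 1) →
    (cur + k + 1 = b.length ∨ b.getD (cur + k + 1) 0 ≠ 1) →
    pvWalkF b b.length fuel cur = cur + k := by
  intro k
  induction k with
  | zero =>
    intro fuel cur _ hlen _ hterm
    cases fuel with
    | zero => rfl
    | succ f =>
      simp only [pvWalkF]
      rw [if_neg]
      · omega
      · rintro ⟨h1, h2⟩
        rcases hterm with ht | ht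
        · exact h1 (by omega)
        · exact ht (by simpa using h2)
  | succ k ih =>
    intro fuel cur hfuel hlen hones hterm
    cases fuel with
    | zero => omega
    | succ f =>
      simp only [pvWalkF]
      rw [if_pos ⟨by omega, by simpa using hones 0 (by omega)⟩]
      have := ih f (cur + 1) (by omega) (by omega)
        (fun t ht => by have := hones (t+1) (by omega); convert this using 2; omega)
        (by rcases hterm with ht | ht
            · left; omega
            · right; convert ht using 3; omega)
      rw [this]; omega

theorem walkB_le (b : List Int) : ∀ (fuel cur : Nat), pvWalkB b fuel cur ≤ cur := by
  intro fuel
  induction fuel with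
  | zero => intro cur; exact Nat.le_refl _
  | succ f ih =>
    intro cur
    simp only [pvWalkB]
    split_ifs with h
    · exact le_trans (ih (cur-1)) (by omega)
    · exact Nat.le_refl _

theorem walkB_congr (b1 b2 : List Int) :
    ∀ (fuel cur : Nat), (∀ idx, idx < cur → b1.getD idx 0 = b2.getD idx 0) →
    pvWalkB b1 fuel cur = pvWalkB b2 fuel cur := by
  intro fuel
  induction fuel with
  | zero => intro cur _; rfl
  | succ f ih =>
    intro cur hagree
    simp only [pvWalkB]
    by_cases h : (cur ≠ 0 ∧ b1.getD (cur - 1) 0 = 1)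
    · rw [if_pos h, if_pos ⟨h.1, by rw [← hagree (cur-1) (by omega)]; exact h.2⟩]
      exact ih (cur-1) (fun idx hidx => hagree idx (by omega))
    · rw [if_neg h, if_neg]
      rintro ⟨h1, h2⟩
      exact h ⟨h1, by rw [hagree (cur-1) (by omega)]; exact h2⟩

theorem walkB_zero_fuel (b : List Int) : ∀ fuel, pvWalkB b fuel 0 = 0 := by
  intro fuel; cases fuel with
  | zero => rfl
  | succ f => simp only [pvWalkB]; rw [if_neg]; rintro ⟨h1, _⟩; exact h1 rfl

theorem walkB_fuel (b : List Int) :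
    ∀ (f1 f2 cur : Nat), cur ≤ f1 → cur ≤ f2 →
    pvWalkB b f1 cur = pvWalkB b f2 cur := by
  intro f1
  induction f1 with
  | zero =>
    intro f2 cur h1 _
    have hc : cur = 0 := by omega
    subst hc
    rw [walkB_zero_fuel, walkB_zero_fuel]
  | succ f1 ih =>
    intro f2 cur h1 h2
    rcases Nat.eq_zero_or_pos cur with hc | hc
    · subst hc; rw [walkB_zero_fuel, walkB_zero_fuel]
    · cases f2 with
      | zero => omega
      | succ f2 =>
        by_cases hcond : (cur ≠ 0 ∧ b.getD (cur - 1) 0 = 1)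
        · simp only [pvWalkB, if_pos hcond]
          exact ih f2 (cur-1) (by omega) (by omega)
        · simp only [pvWalkB, if_neg hcond]

theorem walkB_run (b : List Int) :
    ∀ (k fuel cur : Nat), k ≤ fuel → k ≤ cur →
    (∀ t, t < k → b.getD (cur - 1 - t) 0 = 1) →
    (cur - k = 0 ∨ b.getD (cur - k - 1) 0 ≠ 1) →
    pvWalkB b fuel cur = cur - k := by
  intro k
  induction k with
  | zero =>
    intro fuel cur _ _ _ hterm
    have hres : cur - 0 = cur := by omega
    rw [hres]
    cases fuel with
    | zero => rfl
    | succ f =>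
      simp only [pvWalkB]
      rw [if_neg]
      rintro ⟨h1, h2⟩
      rcases hterm with ht | ht
      · exact h1 (by omega)
      · apply ht
        have e : cur - 0 - 1 = cur - 1 := by omega
        rw [e]; exact h2
  | succ k ih =>
    intro fuel cur hfuel hcur hones hterm
    cases fuel with
    | zero => omega
    | succ f =>
      have hcond : (cur ≠ 0 ∧ b.getD (cur - 1) 0 = 1) := by
        refine ⟨by omega, ?_⟩
        have h0 := hones 0 (by omega)
        have e : cur - 1 - 0 = cur - 1 := by omega
        rwa [e] at h0
      simp only [pvWalkB, if_pos hcond]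
      have hones' : ∀ t, t < k → b.getD (cur - 1 - 1 - t) 0 = 1 := by
        intro t ht
        have hh := hones (t+1) (by omega)
        have e : cur - 1 - (t + 1) = cur - 1 - 1 - t := by omega
        rwa [e] at hh
      have hterm' : cur - 1 - k = 0 ∨ b.getD (cur - 1 - k - 1) 0 ≠ 1 := by
        rcases hterm with ht | ht
        · left; omega
        · right
          have e : cur - (k + 1) - 1 = cur - 1 - k - 1 := by omega
          rwa [e] at ht
      have hrec := ih f (cur - 1) (by omega) (by omega) hones' hterm'
      rw [hrec]; omega

theorem walkF_shift (p rest : List Int) :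
    ∀ (fuel cur : Nat),
    pvWalkF (p ++ rest) (p.length + rest.length) fuel (p.length + cur)
      = p.length + pvWalkF rest rest.length fuel cur := by
  intro fuel
  induction fuel with
  | zero => intro cur; rfl
  | succ f ih =>
    intro cur
    have hget : (p ++ rest).getD (p.length + cur + 1) 0 = rest.getD (cur + 1) 0 := by
      rw [List.getD_append_right _ _ _ _ (by omega)]
      congr 1; omega
    by_cases hm : rest.length = 0
    · have hr : rest = [] := List.eq_nil_of_length_eq_zero hm
      subst hr
      have hA : ¬(p.length + cur ≠ p.length + List.length ([] : List Int) - 1 ∧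
          (p ++ ([] : List Int)).getD (p.length + cur + 1) 0 = 1) := by
        rintro ⟨_, h2⟩
        rw [hget] at h2
        simp at h2
      have hB : ¬(cur ≠ List.length ([] : List Int) - 1 ∧
          ([] : List Int).getD (cur + 1) 0 = 1) := by
        rintro ⟨_, h2⟩; simp at h2
      simp only [pvWalkF]
      rw [if_neg hA, if_neg hB]
    · by_cases hcond : (cur ≠ rest.length - 1 ∧ rest.getD (cur + 1) 0 = 1)
      · simp only [pvWalkF]
        rw [if_pos ⟨by omega, by rw [hget]; exact hcond.2⟩, if_pos hcond]
        have e : p.length + cur + 1 = p.length + (cur + 1) := by omega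
        rw [e, ih (cur + 1)]
      · simp only [pvWalkF]
        rw [if_neg, if_neg hcond]
        rintro ⟨h1, h2⟩
        rw [hget] at h2
        exact hcond ⟨by omega, h2⟩

theorem fwdGo_stop (n j : Nat) (b : List Int) (h : n ≤ j) : pvFwdGo n j b = b := by
  rw [pvFwdGo, dif_neg (by omega)]

theorem fwd_shift : ∀ (m : Nat) (rest p : List Int), rest.length = m →
    pvFwdGo (p.length + m) p.length (p ++ rest) = p ++ pvFwdGo m 0 rest := by
  intro m
  induction m using Nat.strong_induction_on with
  | _ m ih =>
    intro rest p hm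
    cases rest with
    | nil =>
      simp only [List.length_nil] at hm
      rw [fwdGo_stop _ _ _ (by omega), fwdGo_stop _ _ _ (by omega), List.append_nil]
    | cons v r =>
      simp only [List.length_cons] at hm
      have hm1 : 1 ≤ m := by omega
      have hget0 : (p ++ v :: r).getD p.length 0 = v := by
        rw [List.getD_append_right _ _ _ _ (le_refl _)]; simp
      rw [pvFwdGo, dif_pos (show p.length < p.length + m by omega), hget0]
      conv_rhs => rw [pvFwdGo, dif_pos (show 0 < m by omega)]
      simp only [List.getD_cons_zero]
      by_cases hv : v = (2:Int)
      · rw [if_pos hv, if_pos hv]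
        have hcurL : pvWalkF (p ++ v :: r) (p.length + m) (p.length + m) p.length
            = p.length + pvWalkF (v :: r) m m 0 := by
          have h1 := walkF_shift p (v :: r) (p.length + m) 0
          simp only [List.length_cons, hm, Nat.add_zero] at h1
          rw [h1]
          congr 1
          exact walkF_fuel (v :: r) m (by simp [← hm]) (p.length + m) m 0 (by omega) (by omega)
        set curR := pvWalkF (v :: r) m m 0 with hcurR
        simp only [hcurL]
        by_cases hmark : (curR ≠ m - 1 ∧ curR ≠ 0)
        · rw [if_pos ⟨by omega, by omega⟩, if_pos hmark]
          have hset : (p ++ v :: r).set (p.length + curR + 1) 3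
              = p ++ (v :: r.set curR 3) := by
            rw [List.set_append, if_neg (by omega)]
            congr 1
            have e : p.length + curR + 1 - p.length = curR + 1 := by omega
            rw [e, List.set_cons_succ]
          rw [hset]
          have hIH := ih (m - 1) (by omega) (r.set curR 3) (p ++ [v])
            (by simp; omega)
          simp only [List.length_append, List.length_cons, List.length_nil] at hIH
          have e1 : p.length + 1 + (m - 1) = p.length + m := by omega
          have e2 : (p ++ [v]) ++ r.set curR 3 = p ++ v :: r.set curR 3 := by simp
          rw [e1, e2] at hIH
          rw [hIH]
          have hIH2 := ih (m - 1) (by omega) (r.set curR 3) [v] (by simp; omega)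
          simp only [List.length_cons, List.length_nil] at hIH2
          have e3 : 1 + (m - 1) = m := by omega
          have e4 : [v] ++ r.set curR 3 = v :: r.set curR 3 := by simp
          rw [e3, e4] at hIH2
          simp only [List.set_cons_succ, Nat.zero_add]
          rw [hIH2]
          simp
        · rw [if_neg (by omega), if_neg hmark]
          have hIH := ih (m - 1) (by omega) r (p ++ [v]) (by omega)
          simp only [List.length_append, List.length_cons, List.length_nil] at hIH
          have e1 : p.length + 1 + (m - 1) = p.length + m := by omega
          have e2 : (p ++ [v]) ++ r = p ++ v :: r := by simp
          rw [e1, e2] at hIH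
          rw [hIH]
          have hIH2 := ih (m - 1) (by omega) r [v] (by omega)
          simp only [List.length_cons, List.length_nil] at hIH2
          have e3 : 1 + (m - 1) = m := by omega
          have e4 : [v] ++ r = v :: r := by simp
          rw [e3, e4] at hIH2
          simp only [Nat.zero_add]
          rw [hIH2]
          simp
      · rw [if_neg hv, if_neg hv]
        have hIH := ih (m - 1) (by omega) r (p ++ [v]) (by omega)
        simp only [List.length_append, List.length_cons, List.length_nil] at hIH
        have e1 : p.length + 1 + (m - 1) = p.length + m := by omega
        have e2 : (p ++ [v]) ++ r = p ++ v :: r := by simp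
        rw [e1, e2] at hIH
        rw [hIH]
        have hIH2 := ih (m - 1) (by omega) r [v] (by omega)
        simp only [List.length_cons, List.length_nil] at hIH2
        have e3 : 1 + (m - 1) = m := by omega
        have e4 : [v] ++ r = v :: r := by simp
        rw [e3, e4] at hIH2
        simp only [Nat.zero_add]
        rw [hIH2]
        simp

theorem pvFwdGo_unfold (n j : Nat) (b : List Int) (h : j < n) :
    pvFwdGo n j b = pvFwdGo n (j+1)
      (if b.getD j 0 = 2 then
        (if pvWalkF b n n j ≠ n - 1 ∧ pvWalkF b n n j ≠ j
          then b.set (pvWalkF b n n j + 1) 3 else b)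
      else b) := by
  rw [pvFwdGo, dif_pos h]

theorem fwd_cons (v : Int) (r : List Int) :
    pvFwdGo (r.length + 1) 1 (v :: r) = v :: pvFwdGo r.length 0 r := by
  have h := fwd_shift r.length r [v] rfl
  simp only [List.length_cons, List.length_nil, List.singleton_append] at h
  have e : r.length + 1 = 1 + r.length := by omega
  rw [e]
  exact h

theorem fwd_noop : ∀ (q rest : List Int), (∀ x ∈ q, x ≠ (2:Int)) →
    pvFwdGo (q.length + rest.length) 0 (q ++ rest) = q ++ pvFwdGo rest.length 0 rest := by
  intro q
  induction q with
  | nil => intro rest _; simp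
  | cons x q' ih =>
    intro rest hq
    have hx : x ≠ (2:Int) := hq x List.mem_cons_self
    have hlt : 0 < (x :: q').length + rest.length := by simp
    rw [pvFwdGo_unfold _ _ _ hlt]
    simp only [List.cons_append, List.getD_cons_zero, if_neg hx]
    have e : (x :: q').length + rest.length = (q' ++ rest).length + 1 := by simp; omega
    rw [e, fwd_cons]
    have e2 : (q' ++ rest).length = q'.length + rest.length := by simp
    rw [e2, ih rest (fun y hy => hq y (List.mem_cons_of_mem _ hy))]

theorem fwd_noop' (q : List Int) (hq : ∀ x ∈ q, x ≠ (2:Int)) :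
    pvFwdGo q.length 0 q = q := by
  have h := fwd_noop q [] hq
  simp only [List.append_nil, List.length_nil, Nat.add_zero] at h
  rw [h, fwdGo_stop _ _ _ (by simp), List.append_nil]

theorem mem_rep_ne_two (k : Nat) : ∀ x ∈ List.replicate k (1:Int), x ≠ (2:Int) := by
  intro x hx
  rw [List.eq_of_mem_replicate hx]
  norm_num

theorem pvFwd_eq_sp : ∀ (N : Nat) (b : List Int), b.length = N →
    pvFwdGo b.length 0 b = pvSP false b false 0 := by
  intro N
  induction N using Nat.strong_induction_on with
  | _ N ih =>
    intro b hN
    cases b with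
    | nil => rw [fwdGo_stop _ _ _ (by simp)]; rfl
    | cons x t =>
      simp only [List.length_cons] at hN
      by_cases hx : x = (2:Int)
      · subst hx
        obtain ⟨k, hdec | ⟨v, r, hv, hdec⟩⟩ := ones_decomp t
        · -- t is all ones: the run hits the boundary, nothing is marked
          subst hdec
          set b : List Int := 2 :: List.replicate k 1 with hb
          have hlen : b.length = k + 1 := by simp [hb]
          have hcur : pvWalkF b b.length b.length 0 = 0 + k := by
            apply walkF_run
            · omega
            · omega
            · intro u hu
              have eu : 0 + 1 + u = u + 1 := by omega
              have e1 : b.getD (0 + 1 + u) 0 = (List.replicate k (1:Int)).getD u 0 := by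
                rw [hb, eu, List.getD_cons_succ]
              rw [e1, List.getD_replicate _ hu]
            · left; omega
          have hlt : 0 < b.length := by omega
          rw [pvFwdGo_unfold _ _ _ hlt]
          have hg0 : b.getD 0 0 = 2 := by rw [hb]; rfl
          rw [hg0, if_pos rfl, hcur]
          have hnm : ¬(0 + k ≠ b.length - 1 ∧ 0 + k ≠ 0) := by omega
          rw [if_neg hnm]
          have el : b.length = (List.replicate k (1:Int)).length + 1 := by
            rw [hb]; simp
          rw [el, hb, fwd_cons]
          rw [fwd_noop' _ (mem_rep_ne_two k)]
          simp only [pvSP]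
          norm_num [sp_ones]
        · subst hdec
          rcases Nat.eq_zero_or_pos k with hk0 | hk1
          · -- no white after the black: nothing is marked, recurse on the tail
            subst hk0
            simp only [List.replicate_zero, List.nil_append] at *
            set b : List Int := 2 :: v :: r with hb
            have hlen : b.length = r.length + 2 := by simp [hb]
            have hcur : pvWalkF b b.length b.length 0 = 0 + 0 := by
              apply walkF_run
              · omega
              · omega
              · intro u hu; omega
              · right
                have e1 : b.getD (0 + 0 + 1) 0 = v := by rw [hb]; rfl
                rw [e1]; exact hv
            have hlt : 0 < b.length := by omega
            rw [pvFwdGo_unfold _ _ _ hlt]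
            have hg0 : b.getD 0 0 = 2 := by rw [hb]; rfl
            rw [hg0, if_pos rfl, hcur]
            have hnm : ¬((0:Nat) + 0 ≠ b.length - 1 ∧ (0:Nat) + 0 ≠ 0) := by omega
            rw [if_neg hnm]
            have el : b.length = (v :: r : List Int).length + 1 := by
              rw [hb]; simp
            rw [el, hb, fwd_cons]
            have hlt2 : (v :: r : List Int).length < N := by
              simp only [List.length_cons] at hN ⊢; omega
            rw [ih (v :: r).length hlt2 _ rfl]
            have hrhs : pvSP false (2 :: v :: r) false 0
                = 2 :: pvSP false (v :: r) true 0 := by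
              simp only [pvSP]; norm_num
            rw [hrhs, sp_head_agnostic false (v :: r) (Or.inr (by simpa using hv))]
          · -- a real run: the terminator v is overwritten with 3
            set b : List Int := 2 :: (List.replicate k 1 ++ v :: r) with hb
            have hlb : b.length = k + r.length + 2 := by simp [hb]; omega
            have hcur : pvWalkF b b.length b.length 0 = 0 + k := by
              apply walkF_run
              · omega
              · omega
              · intro u hu
                have eu : 0 + 1 + u = u + 1 := by omega
                have e1 : b.getD (0 + 1 + u) 0
                    = (List.replicate k 1 ++ v :: r).getD u 0 := by
                  rw [hb, eu, List.getD_cons_succ]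
                rw [e1, List.getD_append _ _ _ _ (by simp; omega),
                  List.getD_replicate _ hu]
              · right
                have ek : 0 + k + 1 = k + 1 := by omega
                have e1 : b.getD (0 + k + 1) 0 = v := by
                  rw [hb, ek, List.getD_cons_succ,
                    List.getD_append_right _ _ _ _ (by simp)]
                  simp
                rw [e1]; exact hv
            have hlt : 0 < b.length := by omega
            rw [pvFwdGo_unfold _ _ _ hlt]
            have hg0 : b.getD 0 0 = 2 := by rw [hb]; rfl
            rw [hg0, if_pos rfl, hcur]
            have hmk : ((0:Nat) + k ≠ b.length - 1 ∧ (0:Nat) + k ≠ 0) := by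
              constructor <;> omega
            rw [if_pos hmk]
            have hset : b.set (0 + k + 1) 3
                = 2 :: ((List.replicate k 1 ++ [(3:Int)]) ++ r) := by
              have ek : 0 + k + 1 = k + 1 := by omega
              rw [hb, ek, List.set_cons_succ]
              rw [List.set_append, if_neg (by simp)]
              simp
            rw [hset]
            have el : b.length = ((List.replicate k 1 ++ [(3:Int)]) ++ r).length + 1 := by
              simp only [hb, List.length_cons, List.length_append,
                List.length_replicate, List.length_nil]
              omega
            rw [el, fwd_cons]
            have e2 : ((List.replicate k 1 ++ [(3:Int)]) ++ r).length
                = (List.replicate k 1 ++ [(3:Int)]).length + r.length := by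
              simp only [List.length_append]
            have hq3 : ∀ y ∈ List.replicate k (1:Int) ++ [(3:Int)], y ≠ (2:Int) := by
              intro y hy
              rcases List.mem_append.mp hy with h | h
              · exact mem_rep_ne_two k y h
              · simp only [List.mem_singleton] at h; rw [h]; norm_num
            rw [e2, fwd_noop _ _ hq3]
            have hrN : r.length < N := by
              simp only [List.length_append, List.length_replicate,
                List.length_cons] at hN
              omega
            rw [ih r.length hrN r rfl]
            have hrhs : pvSP false b false 0
                = 2 :: (List.replicate k 1 ++ 3 :: pvSP false r false 0) := by
              rw [hb]
              simp only [pvSP]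
              norm_num
              rw [sp_ones_term false v r hv k hk1 0]
              norm_num
            rw [hrhs]
            simp
      · -- head is not BLACK: the step is a no-op
        have hlt : 0 < (x :: t : List Int).length := by simp
        rw [pvFwdGo_unfold _ _ _ hlt]
        have hgd : (x :: t).getD 0 0 = x := rfl
        rw [hgd, if_neg hx]
        have el : (x :: t : List Int).length = t.length + 1 := by simp
        rw [el, fwd_cons]
        rw [ih t.length (by omega) t rfl]
        by_cases hx1 : x = (1:Int)
        · subst hx1; simp [pvSP]
        · simp only [pvSP, if_neg hx1, if_neg hx]
          norm_num

theorem pvBwdGo_unfold (n h : Nat) (b : List Int) (hh : h < n) :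
    pvBwdGo n h b = pvBwdGo n (h+1)
      (if b.getD h 0 = 2 then
        (if pvWalkB b n h ≠ 0 ∧ pvWalkB b n h ≠ h
          then b.set (pvWalkB b n h - 1) 3 else b)
      else b) := by
  rw [pvBwdGo, dif_pos hh]

theorem bwdGo_stop (n h : Nat) (b : List Int) (hle : n ≤ h) : pvBwdGo n h b = b := by
  rw [pvBwdGo, dif_neg (by omega)]

theorem sp_cons_inactive (rs : Bool) (y : Int) (t : List Int) (hy : y ≠ 2) :
    pvSP rs (y :: t) false 0 = y :: pvSP rs t false 0 := by
  by_cases hy1 : y = 1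
  · subst hy1; simp [pvSP]
  · simp only [pvSP, if_neg hy1, if_neg hy]
    norm_num

theorem sp_cons_two (rs : Bool) (t : List Int) :
    pvSP rs ((2:Int) :: t) false 0 = 2 :: pvSP rs t true 0 := by
  simp only [pvSP]
  norm_num

theorem sp_cons_head (rs : Bool) (v : Int) (t : List Int) (hv : v ≠ 1) :
    pvSP rs (v :: t) false 0 = v :: pvSP rs t (decide (v = 2)) 0 := by
  by_cases hv2 : v = 2
  · subst hv2; rw [sp_cons_two]; simp
  · rw [sp_cons_inactive rs v t hv2]
    simp [hv2]

theorem getD_ne_two (q : List Int) (hq : ∀ x ∈ q, x ≠ (2:Int)) (h : Nat) :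
    q.getD h 0 ≠ 2 := by
  by_cases hlt : h < q.length
  · rw [List.getD_eq_getElem?_getD, List.getElem?_eq_getElem hlt]
    exact hq _ (List.getElem_mem hlt)
  · rw [List.getD_eq_getElem?_getD, List.getElem?_eq_none (by omega)]
    norm_num

theorem bwd_no2 : ∀ (d n h : Nat) (q : List Int), n - h = d →
    (∀ x ∈ q, x ≠ (2:Int)) → pvBwdGo n h q = q := by
  intro d
  induction d with
  | zero => intro n h q hd hq; exact bwdGo_stop n h q (by omega)
  | succ d ih =>
    intro n h q hd hq
    rw [pvBwdGo_unfold n h q (by omega), if_neg (getD_ne_two q hq h)]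
    exact ih n (h+1) q (by omega) hq

theorem bwd_skip_no2 : ∀ (c n j : Nat) (b : List Int),
    (∀ h2, j ≤ h2 → h2 < j + c → b.getD h2 0 ≠ 2) →
    pvBwdGo n j b = pvBwdGo n (j + c) b := by
  intro c
  induction c with
  | zero => intro n j b _; rfl
  | succ c ih =>
    intro n j b hno
    by_cases hj : j < n
    · rw [pvBwdGo_unfold n j b hj, if_neg (hno j (le_refl _) (by omega))]
      have := ih n (j+1) b (fun h2 h1 h2' => hno h2 (by omega) (by omega))
      rw [this]
      congr 1
      omega
    · rw [bwdGo_stop n j b (by omega), bwdGo_stop n (j + (c+1)) b (by omega)]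

theorem bwd_prefix : ∀ (d h : Nat) (l' s : List Int), h + d = l'.length →
    pvBwdGo (l'.length + s.length) h (l' ++ s)
      = pvBwdGo (l'.length + s.length) l'.length ((pvBwdGo l'.length h l') ++ s) := by
  intro d
  induction d with
  | zero =>
    intro h l' s hd
    have : h = l'.length := by omega
    subst this
    rw [bwdGo_stop l'.length l'.length l' (le_refl _)]
  | succ d ih =>
    intro h l' s hd
    have hh : h < l'.length := by omega
    have hgd : (l' ++ s).getD h 0 = l'.getD h 0 := List.getD_append _ _ _ _ hh
    have hwalk : pvWalkB (l' ++ s) (l'.length + s.length) h = pvWalkB l' l'.length h := by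
      rw [walkB_congr (l' ++ s) l' _ h
        (fun idx hidx => List.getD_append _ _ _ _ (by omega))]
      exact walkB_fuel l' _ _ h (by omega) (by omega)
    rw [pvBwdGo_unfold (l'.length + s.length) h (l' ++ s) (by omega),
      pvBwdGo_unfold l'.length h l' hh, hgd, hwalk]
    by_cases hb2 : l'.getD h 0 = 2
    · rw [if_pos hb2, if_pos hb2]
      have hle := walkB_le l' l'.length h
      by_cases hmk : pvWalkB l' l'.length h ≠ 0 ∧ pvWalkB l' l'.length h ≠ h
      · rw [if_pos hmk, if_pos hmk]
        have hset : (l' ++ s).set (pvWalkB l' l'.length h - 1) 3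
            = l'.set (pvWalkB l' l'.length h - 1) 3 ++ s := by
          rw [List.set_append, if_pos (by omega)]
        rw [hset]
        have := ih (h+1) (l'.set (pvWalkB l' l'.length h - 1) 3) s
          (by rw [List.length_set]; omega)
        rw [List.length_set] at this
        exact this
      · rw [if_neg hmk, if_neg hmk]
        exact ih (h+1) l' s (by omega)
    · rw [if_neg hb2, if_neg hb2]
      exact ih (h+1) l' s (by omega)

theorem pvBwd_eq_sp : ∀ (N : Nat) (b : List Int), b.length = N →
    pvBwdGo b.length 0 b = (pvSP true b.reverse false 0).reverse := by
  intro N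
  induction N using Nat.strong_induction_on with
  | _ N ih =>
    intro b hN
    rcases List.eq_nil_or_concat b with hnil | ⟨l', y, hby⟩
    · subst hnil; rw [bwdGo_stop _ _ _ (by simp)]; rfl
    · rw [List.concat_eq_append] at hby
      subst hby
      have hlen : (l' ++ [y]).length = l'.length + 1 := by simp
      have hIH : pvBwdGo l'.length 0 l' = (pvSP true l'.reverse false 0).reverse := by
        apply ih l'.length (by simp only [List.length_append, List.length_cons,
          List.length_nil] at hN; omega) l' rfl
      have hbp := bwd_prefix l'.length 0 l' [y] (by omega)
      simp only [List.length_cons, List.length_nil, Nat.zero_add] at hbp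
      by_cases hy : y = (2:Int)
      · subst hy
        obtain ⟨k, hdec | ⟨v, r, hv, hdec⟩⟩ := ones_decomp l'.reverse
        · -- l' is all ones: the walk reaches index 0, nothing is marked
          have hl' : l' = List.replicate k 1 := by
            have := congrArg List.reverse hdec
            simpa [List.reverse_replicate] using this
          subst hl'
          have hB : pvBwdGo (List.replicate k (1:Int)).length 0 (List.replicate k 1)
              = List.replicate k 1 := bwd_no2 _ _ _ _ rfl (by
                intro x hx; rw [List.eq_of_mem_replicate hx]; norm_num)
          rw [hlen, hbp, hB]
          have hrepk : (List.replicate k (1:Int)).length = k := by simp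
          rw [hrepk]
          have hcur : pvWalkB (List.replicate k (1:Int) ++ [2]) (k + 1) k = k - k := by
            apply walkB_run
            · omega
            · omega
            · intro t ht
              rw [List.getD_append _ _ _ _ (by simp only [List.length_replicate]; omega),
                List.getD_replicate _ (by omega)]
            · left; omega
          rw [pvBwdGo_unfold _ _ _ (by omega), hcur]
          have hg2 : (List.replicate k (1:Int) ++ [2]).getD k 0 = 2 := by
            rw [List.getD_append_right _ _ _ _ (by simp only [List.length_replicate]; omega)]
            simp
          rw [hg2, if_pos rfl, if_neg (by omega)]
          rw [bwdGo_stop _ _ _ (by omega)]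
          have hrhs : pvSP true ((List.replicate k (1:Int) ++ [2]).reverse) false 0
              = 2 :: List.replicate k 1 := by
            rw [List.reverse_append, List.reverse_replicate]
            simp only [List.reverse_cons, List.reverse_nil, List.nil_append,
              List.singleton_append]
            rw [sp_cons_two, sp_ones]
          rw [hrhs]
          simp [List.reverse_replicate]
        · -- l' ends in v ≠ 1 followed by k trailing ones
          have hl' : l' = (r.reverse ++ [v]) ++ List.replicate k 1 := by
            have := congrArg List.reverse hdec
            simpa [List.reverse_append, List.reverse_replicate] using this
          set m := r.reverse with hm
          have hIH2 : pvBwdGo (m ++ [v]).length 0 (m ++ [v])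
              = (pvSP true (v :: m.reverse) false 0).reverse := by
            have e : (m ++ [v]).reverse = v :: m.reverse := by simp
            have hlq : (m ++ [v]).length < N := by
              rw [hl'] at hN
              simp only [List.length_append, List.length_cons, List.length_nil,
                List.length_replicate] at hN ⊢
              omega
            have := ih (m ++ [v]).length hlq (m ++ [v]) rfl
            rwa [e] at this
          set g : List Int := pvSP true m.reverse (decide (v = 2)) 0 with hg
          have hBv : pvBwdGo (m ++ [v]).length 0 (m ++ [v]) = g.reverse ++ [v] := by
            rw [hIH2, sp_cons_head true v m.reverse hv, ← hg]
            simp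
          have hlg : g.length = m.length := by rw [hg, pvSP_length, List.length_reverse]
          have hbsplit : l' ++ [(2:Int)] = (m ++ [v]) ++ (List.replicate k 1 ++ [2]) := by
            rw [hl', hm]
            simp
          rw [hbsplit]
          set q : Nat := m.length + 1 with hq
          have hq' : (m ++ [v]).length = q := by
            simp only [List.length_append, List.length_cons, List.length_nil]; omega
          have hn : ((m ++ [v]) ++ (List.replicate k 1 ++ [(2:Int)])).length
              = q + k + 1 := by
            simp only [List.length_append, List.length_cons, List.length_nil,
              List.length_replicate]
            omega
          have hbp2 := bwd_prefix (m ++ [v]).length 0 (m ++ [v])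
            (List.replicate k 1 ++ [2]) (by omega)
          have hsl : (List.replicate k (1:Int) ++ [(2:Int)]).length = k + 1 := by
            simp only [List.length_append, List.length_cons, List.length_nil,
              List.length_replicate]
          rw [hsl, hq'] at hbp2
          have hqk : q + (k + 1) = q + k + 1 := by omega
          rw [hq'] at hBv
          rw [hn, ← hqk, hbp2, hBv, hqk]
          set X : List Int := (g.reverse ++ [v]) ++ (List.replicate k 1 ++ [2]) with hX
          have hgrl : g.reverse.length = m.length := by
            rw [List.length_reverse, hlg]
          have hBl : (g.reverse ++ [v] : List Int).length = q := by
            simp only [List.length_append, List.length_cons, List.length_nil, hgrl]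
            omega
          -- skip the k ones
          have hskip : pvBwdGo (q + k + 1) q X = pvBwdGo (q + k + 1) (q + k) X := by
            apply bwd_skip_no2
            intro h2 h1 h2'
            have hx1 : X.getD h2 0 = 1 := by
              rw [hX, List.getD_append_right _ _ _ _ (by omega)]
              rw [List.getD_append _ _ _ _ (by simp only [List.length_replicate]; omega)]
              exact List.getD_replicate _ (by omega)
            rw [hx1]; norm_num
          rw [hskip]
          -- the final black at index q+k
          have hg2 : X.getD (q + k) 0 = 2 := by
            rw [hX, List.getD_append_right _ _ _ _ (by omega)]
            rw [List.getD_append_right _ _ _ _ (by simp only [List.length_replicate]; omega)]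
            have e : q + k - (g.reverse ++ [v]).length - (List.replicate k (1:Int)).length
                = 0 := by
              simp only [List.length_replicate, hBl]
              omega
            rw [e]
            rfl
          have hvlast : X.getD (q - 1) 0 = v := by
            rw [hX, List.getD_append _ _ _ _ (by omega)]
            rw [List.getD_append_right _ _ _ _ (by omega)]
            have e : q - 1 - g.reverse.length = 0 := by rw [hgrl]; omega
            rw [e]
            rfl
          have hcur : pvWalkB X (q + k + 1) (q + k) = q + k - k := by
            apply walkB_run
            · omega
            · omega
            · intro t ht
              rw [hX, List.getD_append_right _ _ _ _ (by omega)]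
              rw [List.getD_append _ _ _ _ (by simp only [List.length_replicate]; omega)]
              exact List.getD_replicate _ (by omega)
            · right
              have e : q + k - k - 1 = q - 1 := by omega
              rw [e, hvlast]
              exact hv
          rw [pvBwdGo_unfold _ _ _ (by omega), hg2, if_pos rfl, hcur]
          rcases Nat.eq_zero_or_pos k with hk0 | hk1
          · -- k = 0 : the run is empty, nothing is marked
            subst hk0
            rw [if_neg (by omega)]
            rw [bwdGo_stop _ _ _ (by omega)]
            have hrhs : pvSP true ((l' ++ [(2:Int)]).reverse) false 0
                = 2 :: v :: g := by
              rw [List.reverse_append, hl']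
              simp only [List.reverse_cons, List.reverse_nil, List.nil_append,
                List.singleton_append, List.reverse_append, List.reverse_replicate,
                List.replicate_zero, List.append_nil, ← hm]
              rw [sp_cons_two]
              rw [sp_head_agnostic true (v :: m.reverse)
                (Or.inr (by simpa using hv))]
              rw [sp_cons_head true v m.reverse hv, ← hg]
            rw [← hbsplit, hrhs]
            simp [hX]
          · -- k ≥ 1 : the left neighbour of the white run, the v-cell, is marked 3
            rw [if_pos ⟨by omega, by omega⟩]
            have hset : X.set (q + k - k - 1) 3
                = (g.reverse ++ [(3:Int)]) ++ (List.replicate k 1 ++ [2]) := by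
              have e : q + k - k - 1 = q - 1 := by omega
              rw [hX, e, List.set_append, if_pos (by omega)]
              congr 1
              rw [List.set_append, if_neg (by omega)]
              congr 1
              have e2 : q - 1 - g.reverse.length = 0 := by rw [hgrl]; omega
              rw [e2]
              rfl
            rw [hset, bwdGo_stop _ _ _ (by omega)]
            have hrhs : pvSP true ((l' ++ [(2:Int)]).reverse) false 0
                = 2 :: (List.replicate k 1 ++ 3 :: g) := by
              rw [List.reverse_append, hl']
              simp only [List.reverse_cons, List.reverse_nil, List.nil_append,
                List.singleton_append, List.reverse_append, List.reverse_replicate, ← hm]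
              rw [sp_cons_two]
              rw [sp_ones_term true v m.reverse hv k hk1 0]
              simp only [Bool.true_and, ← hg]
            rw [← hbsplit, hrhs]
            simp [List.reverse_replicate]
      · -- last element is not BLACK: the final step is a no-op
        rw [hlen, hbp, hIH]
        have hB'len : ((pvSP true l'.reverse false 0).reverse).length = l'.length := by
          rw [List.length_reverse, pvSP_length, List.length_reverse]
        rw [pvBwdGo_unfold _ _ _ (by omega)]
        have hgy : ((pvSP true l'.reverse false 0).reverse ++ [y]).getD l'.length 0 = y := by
          rw [List.getD_append_right _ _ _ _ (by omega)]
          rw [hB'len]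
          simp
        rw [hgy, if_neg hy, bwdGo_stop _ _ _ (by omega)]
        have hrhs : pvSP true ((l' ++ [y]).reverse) false 0
            = y :: pvSP true l'.reverse false 0 := by
          rw [List.reverse_append]
          simp only [List.reverse_cons, List.reverse_nil, List.nil_append,
            List.singleton_append]
          exact sp_cons_inactive true y l'.reverse hy
        rw [hrhs]
        simp

theorem pvMark_eq (b : List Int) :
    checkAndMarkRow b = ((pvSP true (pvSP false b false 0).reverse false 0)).reverse := by
  simp only [checkAndMarkRow]
  rw [pvFwd_eq_sp b.length b rfl]
  have e : b.length = (pvSP false b false 0).length := (pvSP_length false b false 0).symm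
  rw [e, pvBwd_eq_sp (pvSP false b false 0).length (pvSP false b false 0) rfl]

theorem getD_set_same (l : List Int) (i : Nat) (x : Int) (hi : i < l.length) :
    ∀ d, (l.set i x).getD i d = x := by
  intro d
  rw [List.getD_eq_getElem?_getD, List.getElem?_set]
  simp [hi]

theorem getD_set_other (l : List Int) (i j : Nat) (x : Int) (hne : i ≠ j) :
    ∀ d, (l.set i x).getD j d = l.getD j d := by
  intro d
  rw [List.getD_eq_getElem?_getD, List.getElem?_set, if_neg hne,
    ← List.getD_eq_getElem?_getD]

theorem getDr_set_same (l : List (List Int)) (i : Nat) (x : List Int) (hi : i < l.length) :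
    (l.set i x).getD i [] = x := by
  rw [List.getD_eq_getElem?_getD, List.getElem?_set]
  simp [hi]

theorem getDr_set_other (l : List (List Int)) (i j : Nat) (x : List Int) (hne : i ≠ j) :
    (l.set i x).getD j [] = l.getD j [] := by
  rw [List.getD_eq_getElem?_getD, List.getElem?_set, if_neg hne,
    ← List.getD_eq_getElem?_getD]

theorem len_set2 (b : List (List Int)) (r c : Nat) (v : Int) :
    (pvSet2 b r c v).length = b.length := by
  unfold pvSet2; rw [List.length_set]

theorem rowlen_set2 (b : List (List Int)) (r c : Nat) (v : Int) (r' : Nat) :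
    ((pvSet2 b r c v).getD r' []).length = (b.getD r' []).length := by
  unfold pvSet2
  by_cases h : r = r'
  · subst h
    by_cases hr : r < b.length
    · rw [getDr_set_same _ _ _ hr, List.length_set]
    · rw [List.set_eq_of_length_le (by omega)]
  · rw [getDr_set_other _ _ _ _ h]

theorem InB_set2 (b : List (List Int)) (r c : Nat) (v : Int) (p : Nat × Nat) :
    pvInB (pvSet2 b r c v) p ↔ pvInB b p := by
  unfold pvInB
  rw [len_set2, rowlen_set2]

theorem get2_set2_ne (b : List (List Int)) (r c r' c' : Nat) (v : Int)
    (hne : (r, c) ≠ (r', c')) :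
    pvGet2 (pvSet2 b r c v) r' c' = pvGet2 b r' c' := by
  unfold pvGet2 pvSet2
  by_cases h : r = r'
  · subst h
    have hc : c ≠ c' := by intro hc; exact hne (by rw [hc])
    by_cases hr : r < b.length
    · rw [getDr_set_same _ _ _ hr, getD_set_other _ _ _ _ hc]
    · rw [List.set_eq_of_length_le (by omega)]
  · rw [getDr_set_other _ _ _ _ h]

theorem get2_set2_self (b : List (List Int)) (r c : Nat) (v : Int)
    (hin : pvInB b (r, c)) :
    pvGet2 (pvSet2 b r c v) r c = v := by
  obtain ⟨h1, h2⟩ := hin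
  dsimp only at h1 h2
  unfold pvGet2 pvSet2
  rw [getDr_set_same _ _ _ h1, getD_set_same _ _ _ h2]

theorem set2_self (b : List (List Int)) (r c : Nat) (hin : pvInB b (r, c)) :
    pvSet2 b r c (pvGet2 b r c) = b := by
  obtain ⟨h1, h2⟩ := hin
  dsimp only at h1 h2
  unfold pvGet2 pvSet2
  have e1 : (b.getD r []).getD c 0 = (b.getD r [])[c] := by
    rw [List.getD_eq_getElem?_getD, List.getElem?_eq_getElem h2]; rfl
  have e2 : b.getD r [] = b[r] := by
    rw [List.getD_eq_getElem?_getD, List.getElem?_eq_getElem h1]; rfl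
  rw [e1, List.set_getElem_self, e2, List.set_getElem_self]

theorem set2_set2_self (b : List (List Int)) (r c : Nat) (v w : Int) :
    pvSet2 (pvSet2 b r c v) r c w = pvSet2 b r c w := by
  unfold pvSet2
  by_cases hr : r < b.length
  · rw [getDr_set_same _ _ _ hr, List.set_set, List.set_set]
  · have e : ∀ x : List Int, b.set r x = b :=
      fun x => List.set_eq_of_length_le (by omega)
    simp only [e]

theorem set2_comm (b : List (List Int)) (r c r' c' : Nat) (v w : Int)
    (hne : (r, c) ≠ (r', c')) :
    pvSet2 (pvSet2 b r c v) r' c' w = pvSet2 (pvSet2 b r' c' w) r c v := by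
  unfold pvSet2
  by_cases h : r = r'
  · subst h
    have hc : c ≠ c' := by intro hc; exact hne (by rw [hc])
    by_cases hr : r < b.length
    · rw [getDr_set_same _ _ _ hr, getDr_set_same _ _ _ hr,
        List.set_set, List.set_set, List.set_comm _ _ hc]
    · have e : ∀ x : List Int, b.set r x = b :=
        fun x => List.set_eq_of_length_le (by omega)
      simp only [e]
  · rw [getDr_set_other _ _ _ _ (by omega), getDr_set_other _ _ _ _ (by omega),
      List.set_comm _ _ h]

theorem wAll_nil_vals (b : List (List Int)) (C : List (Nat × Nat)) :
    pvWAll b C [] = b := by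
  cases C with
  | nil => rfl
  | cons p t => cases p; rfl

theorem InB_wAll : ∀ (C : List (Nat × Nat)) (vs : List Int) (b : List (List Int))
    (p : Nat × Nat), (pvInB (pvWAll b C vs) p ↔ pvInB b p) := by
  intro C
  induction C with
  | nil => intro vs b p; rfl
  | cons q t ih =>
    intro vs b p
    cases vs with
    | nil => rw [wAll_nil_vals]
    | cons v vs' =>
      cases q with
      | mk r c =>
        show pvInB (pvWAll (pvSet2 b r c v) t vs') p ↔ _
        rw [ih, InB_set2]

theorem get2_wAll_notmem : ∀ (C : List (Nat × Nat)) (vs : List Int)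
    (b : List (List Int)) (p : Nat × Nat), p ∉ C →
    pvGet2 (pvWAll b C vs) p.1 p.2 = pvGet2 b p.1 p.2 := by
  intro C
  induction C with
  | nil => intro vs b p _; rfl
  | cons q t ih =>
    intro vs b p hp
    cases vs with
    | nil => rw [wAll_nil_vals]
    | cons v vs' =>
      cases q with
      | mk r c =>
        show pvGet2 (pvWAll (pvSet2 b r c v) t vs') p.1 p.2 = _
        rw [ih _ _ _ (fun h => hp (List.mem_cons_of_mem _ h))]
        cases p with
        | mk r' c' =>
          exact get2_set2_ne b r c r' c' v (fun h => hp (by rw [← h]; exact List.mem_cons_self))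

theorem extract_wAll : ∀ (C : List (Nat × Nat)) (vs : List Int) (b : List (List Int)),
    C.Nodup → vs.length = C.length → (∀ p ∈ C, pvInB b p) →
    C.map (fun p => pvGet2 (pvWAll b C vs) p.1 p.2) = vs := by
  intro C
  induction C with
  | nil =>
    intro vs b _ hlen _
    simp only [List.length_nil] at hlen
    rw [List.eq_nil_of_length_eq_zero hlen]
    rfl
  | cons q t ih =>
    intro vs b hnd hlen hin
    cases vs with
    | nil => simp at hlen
    | cons v vs' =>
      cases q with
      | mk r c =>
        have hnotmem : (r, c) ∉ t := (List.nodup_cons.mp hnd).1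
        have hstep : pvWAll b ((r,c) :: t) (v :: vs') = pvWAll (pvSet2 b r c v) t vs' := rfl
        rw [List.map_cons, hstep]
        congr 1
        · rw [get2_wAll_notmem t vs' _ (r, c) hnotmem]
          exact get2_set2_self b r c v (hin (r, c) List.mem_cons_self)
        · exact ih vs' (pvSet2 b r c v) (List.nodup_cons.mp hnd).2
            (by simpa using hlen)
            (fun p hp => (InB_set2 b r c v p).mpr (hin p (List.mem_cons_of_mem _ hp)))

theorem wAll_set2_push : ∀ (C : List (Nat × Nat)) (vs : List Int)
    (b : List (List Int)) (r c : Nat) (v : Int), (r, c) ∉ C →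
    pvWAll (pvSet2 b r c v) C vs = pvSet2 (pvWAll b C vs) r c v := by
  intro C
  induction C with
  | nil => intro vs b r c v _; rfl
  | cons q t ih =>
    intro vs b r c v hmem
    cases vs with
    | nil => rw [wAll_nil_vals, wAll_nil_vals]
    | cons w ws =>
      cases q with
      | mk r' c' =>
        have hne : (r, c) ≠ (r', c') := fun h => hmem (by rw [h]; exact List.mem_cons_self)
        show pvWAll (pvSet2 (pvSet2 b r c v) r' c' w) t ws = _
        rw [set2_comm _ _ _ _ _ _ _ hne, ih _ _ _ _ _ (fun h => hmem (List.mem_cons_of_mem _ h))]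
        rfl

theorem wAll_overwrite : ∀ (C : List (Nat × Nat)) (v1 v2 : List Int)
    (b : List (List Int)), C.Nodup → v1.length = C.length → v2.length = C.length →
    pvWAll (pvWAll b C v1) C v2 = pvWAll b C v2 := by
  intro C
  induction C with
  | nil => intro v1 v2 b _ _ _; rfl
  | cons q t ih =>
    intro v1 v2 b hnd h1 h2
    cases v1 with
    | nil => simp at h1
    | cons x xs =>
      cases v2 with
      | nil => simp at h2
      | cons y ys =>
        cases q with
        | mk r c =>
          have hnotmem : (r, c) ∉ t := (List.nodup_cons.mp hnd).1
          show pvWAll (pvWAll (pvSet2 b r c x) t xs) ((r,c)::t) (y :: ys) = _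
          have e1 : pvWAll (pvWAll (pvSet2 b r c x) t xs) ((r,c)::t) (y :: ys)
              = pvWAll (pvSet2 (pvWAll (pvSet2 b r c x) t xs) r c y) t ys := rfl
          rw [e1, ← wAll_set2_push t xs _ r c y hnotmem, set2_set2_self,
            ih xs ys _ (List.nodup_cons.mp hnd).2 (by simpa using h1) (by simpa using h2)]
          rfl

theorem wAll_append : ∀ (C1 C2 : List (Nat × Nat)) (v1 v2 : List Int)
    (b : List (List Int)), C1.length = v1.length →
    pvWAll b (C1 ++ C2) (v1 ++ v2) = pvWAll (pvWAll b C1 v1) C2 v2 := by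
  intro C1
  induction C1 with
  | nil =>
    intro C2 v1 v2 b hlen
    simp only [List.length_nil] at hlen
    rw [List.eq_nil_of_length_eq_zero hlen.symm]
    rfl
  | cons q t ih =>
    intro C2 v1 v2 b hlen
    cases v1 with
    | nil => simp at hlen
    | cons x xs =>
      cases q with
      | mk r c =>
        show pvWAll (pvSet2 b r c x) (t ++ C2) (xs ++ v2) = _
        rw [ih _ _ _ _ (by simpa using hlen)]
        rfl

theorem wAll_reverse : ∀ (C : List (Nat × Nat)) (vs : List Int) (b : List (List Int)),
    C.Nodup → vs.length = C.length →
    pvWAll b C.reverse vs.reverse = pvWAll b C vs := by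
  intro C
  induction C with
  | nil =>
    intro vs b _ hlen
    simp only [List.length_nil] at hlen
    rw [List.eq_nil_of_length_eq_zero hlen]
    rfl
  | cons q t ih =>
    intro vs b hnd hlen
    cases vs with
    | nil => simp at hlen
    | cons v vs' =>
      cases q with
      | mk r c =>
        have hnotmem : (r, c) ∉ t := (List.nodup_cons.mp hnd).1
        simp only [List.reverse_cons]
        rw [wAll_append t.reverse [(r,c)] vs'.reverse [v] b (by
          simp only [List.length_reverse, List.length_cons] at hlen ⊢
          omega)]
        have e1 : pvWAll (pvWAll b t.reverse vs'.reverse) [(r, c)] [v]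
            = pvSet2 (pvWAll b t.reverse vs'.reverse) r c v := rfl
        rw [e1, ih vs' b (List.nodup_cons.mp hnd).2 (by simpa using hlen),
          ← wAll_set2_push t vs' b r c v hnotmem]
        rfl

theorem scan_eq_wAll (rs : Bool) : ∀ (C : List (Nat × Nat)) (b : List (List Int))
    (a : Bool) (w : Nat), C.Nodup → (∀ p ∈ C, pvInB b p) →
    pvScanGo rs C b a w
      = pvWAll b C (pvSP rs (C.map (fun p => pvGet2 b p.1 p.2)) a w) := by
  intro C
  induction C with
  | nil => intro b a w _ _; rfl
  | cons q t ih =>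
    intro b a w hnd hin
    cases q with
    | mk r c =>
      have hnotmem : (r, c) ∉ t := (List.nodup_cons.mp hnd).1
      have hndt : t.Nodup := (List.nodup_cons.mp hnd).2
      have hinb : pvInB b (r, c) := hin (r, c) List.mem_cons_self
      have hint : ∀ p ∈ t, pvInB b p := fun p hp => hin p (List.mem_cons_of_mem _ hp)
      simp only [pvScanGo, List.map_cons, pvSP]
      by_cases h1 : pvGet2 b r c = 1
      · rw [if_pos h1, if_pos h1]
        have e : pvWAll b ((r,c) :: t)
            (pvGet2 b r c :: pvSP rs (t.map (fun p => pvGet2 b p.1 p.2)) a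
              (if a = true then w + 1 else w))
            = pvWAll (pvSet2 b r c (pvGet2 b r c)) t
              (pvSP rs (t.map (fun p => pvGet2 b p.1 p.2)) a
                (if a = true then w + 1 else w)) := rfl
        rw [e, set2_self b r c hinb, ih b _ _ hndt hint]
      · rw [if_neg h1, if_neg h1]
        by_cases h2 : (a = true ∧ 0 < w)
        · rw [if_pos h2, if_pos h2]
          have hmap : t.map (fun p => pvGet2 (pvSet2 b r c 3) p.1 p.2)
              = t.map (fun p => pvGet2 b p.1 p.2) := by
            apply List.map_congr_left
            intro p hp
            cases p with
            | mk r' c' =>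
              exact get2_set2_ne b r c r' c' 3
                (fun h => hnotmem (by rw [h]; exact hp))
          have e : pvWAll b ((r,c) :: t)
              (3 :: pvSP rs (t.map (fun p => pvGet2 b p.1 p.2)) (rs && decide (pvGet2 b r c = 2)) 0)
              = pvWAll (pvSet2 b r c 3) t
                (pvSP rs (t.map (fun p => pvGet2 b p.1 p.2)) (rs && decide (pvGet2 b r c = 2)) 0) := rfl
          rw [e, ih (pvSet2 b r c 3) _ _ hndt
            (fun p hp => (InB_set2 b r c 3 p).mpr (hint p hp)), hmap]
        · rw [if_neg h2, if_neg h2]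
          by_cases h3 : pvGet2 b r c = 2
          · rw [if_pos h3, if_pos h3]
            have e : pvWAll b ((r,c) :: t)
                (pvGet2 b r c :: pvSP rs (t.map (fun p => pvGet2 b p.1 p.2)) true 0)
                = pvWAll (pvSet2 b r c (pvGet2 b r c)) t
                  (pvSP rs (t.map (fun p => pvGet2 b p.1 p.2)) true 0) := rfl
            rw [e, set2_self b r c hinb, ih b _ _ hndt hint]
          · rw [if_neg h3, if_neg h3]
            have e : pvWAll b ((r,c) :: t)
                (pvGet2 b r c :: pvSP rs (t.map (fun p => pvGet2 b p.1 p.2)) false 0)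
                = pvWAll (pvSet2 b r c (pvGet2 b r c)) t
                  (pvSP rs (t.map (fun p => pvGet2 b p.1 p.2)) false 0) := rfl
            rw [e, set2_self b r c hinb, ih b _ _ hndt hint]

def pvR3 (x y : Int) : Prop := y = x ∨ y = 3

theorem sp_keep3 (rs : Bool) : ∀ (l : List Int) (a : Bool) (w : Nat),
    List.Forall₂ pvR3 l (pvSP rs l a w) := by
  intro l
  induction l with
  | nil => intro a w; exact List.Forall₂.nil
  | cons v t ih =>
    intro a w
    simp only [pvSP]
    split_ifs with h1 h2 h3
    all_goals first
      | exact List.Forall₂.cons (Or.inl rfl) (ih _ _)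
      | exact List.Forall₂.cons (Or.inr rfl) (ih _ _)

theorem f2_append_single {R : Int → Int → Prop} :
    ∀ {l1 l2 : List Int} {a b : Int}, List.Forall₂ R l1 l2 → R a b →
    List.Forall₂ R (l1 ++ [a]) (l2 ++ [b]) := by
  intro l1 l2 a b h hab
  induction h with
  | nil => exact List.Forall₂.cons hab List.Forall₂.nil
  | cons hx ht ih => exact List.Forall₂.cons hx ih

theorem f2_rev {R : Int → Int → Prop} :
    ∀ {l1 l2 : List Int}, List.Forall₂ R l1 l2 →
    List.Forall₂ R l1.reverse l2.reverse := by
  intro l1 l2 h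
  induction h with
  | nil => exact List.Forall₂.nil
  | cons hx ht ih =>
    simp only [List.reverse_cons]
    exact f2_append_single ih hx

theorem r3_trans : ∀ {l1 l2 l3 : List Int},
    List.Forall₂ pvR3 l1 l2 → List.Forall₂ pvR3 l2 l3 → List.Forall₂ pvR3 l1 l3 := by
  intro l1 l2 l3 h1
  induction h1 generalizing l3 with
  | nil => intro h2; cases h2; exact List.Forall₂.nil
  | cons hx ht ih =>
    intro h2
    cases h2 with
    | cons hy ht2 =>
      refine List.Forall₂.cons ?_ (ih ht2)
      rcases hy with hy | hy
      · rw [hy]; exact hx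
      · exact Or.inr hy

theorem mark_keep3 (d : List Int) : List.Forall₂ pvR3 d (checkAndMarkRow d) := by
  rw [pvMark_eq]
  have h1 : List.Forall₂ pvR3 d (pvSP false d false 0) := sp_keep3 false d false 0
  have h2 : List.Forall₂ pvR3 (pvSP false d false 0).reverse
      (pvSP true (pvSP false d false 0).reverse false 0) := sp_keep3 true _ false 0
  have h3 := f2_rev h2
  rw [List.reverse_reverse] at h3
  exact r3_trans h1 h3

theorem f2_getD (d M : List Int) (h : List.Forall₂ pvR3 d M) :
    ∀ j, j < d.length → (M.getD j 0 = d.getD j 0 ∨ M.getD j 0 = 3) := by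
  intro j hj
  obtain ⟨hlen, hget⟩ := List.forall₂_iff_get.mp h
  have hj2 : j < M.length := by omega
  have e1 : M.getD j 0 = M[j] := by
    rw [List.getD_eq_getElem?_getD, List.getElem?_eq_getElem hj2]; rfl
  have e2 : d.getD j 0 = d[j] := by
    rw [List.getD_eq_getElem?_getD, List.getElem?_eq_getElem hj]; rfl
  rw [e1, e2]
  exact hget j hj hj2

theorem wb_loop : ∀ (m : Nat) (fc : Nat → Nat × Nat) (M : List Int)
    (b : List (List Int)), M.length = m →
    (∀ j1 j2, j1 < m → j2 < m → fc j1 = fc j2 → j1 = j2) →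
    (∀ j, j < m → pvInB b (fc j)) →
    (∀ j, j < m → M.getD j 0 ≠ 3 → M.getD j 0 = pvGet2 b (fc j).1 (fc j).2) →
    (List.range m).foldl
      (fun bd j => if M.getD j 0 = 3 then pvSet2 bd (fc j).1 (fc j).2 3 else bd) b
      = pvWAll b ((List.range m).map fc) M := by
  intro m
  induction m with
  | zero =>
    intro fc M b hlen _ _ _
    rw [List.eq_nil_of_length_eq_zero hlen]
    rfl
  | succ m ih =>
    intro fc M b hlen hinj hin hread
    cases M with
    | nil => simp at hlen
    | cons M0 Mt =>
      rw [List.range_succ_eq_map]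
      simp only [List.foldl_cons, List.foldl_map, List.map_cons, List.map_map]
      have hM0 : (M0 :: Mt).getD 0 0 = M0 := rfl
      have hMt : ∀ j, (M0 :: Mt).getD (j + 1) 0 = Mt.getD j 0 := fun j => rfl
      set b0 : List (List Int) :=
        (if (M0 :: Mt).getD 0 0 = 3 then pvSet2 b (fc 0).1 (fc 0).2 3 else b) with hb0
      have hshape : ∀ p, pvInB b0 p ↔ pvInB b p := by
        intro p
        rw [hb0]
        split_ifs
        · exact InB_set2 _ _ _ _ _
        · exact Iff.rfl
      have hstep := ih (fun j => fc (j + 1)) Mt b0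
        (by simpa using hlen)
        (fun j1 j2 h1 h2 he => by
          have := hinj (j1+1) (j2+1) (by omega) (by omega) he
          omega)
        (fun j hj => (hshape _).mpr (hin (j+1) (by omega)))
        (by
          intro j hj hne
          have hr := hread (j+1) (by omega) (by rw [hMt]; exact hne)
          rw [hMt] at hr
          rw [hr, hb0]
          split_ifs
          · show pvGet2 b (fc (j+1)).1 (fc (j+1)).2
                = pvGet2 (pvSet2 b (fc 0).1 (fc 0).2 3) (fc (j+1)).1 (fc (j+1)).2
            have hne2 : ((fc 0).1, (fc 0).2) ≠ ((fc (j+1)).1, (fc (j+1)).2) := by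
              intro hcontra
              have he : fc 0 = fc (j+1) := by
                have e0 : ((fc 0).1, (fc 0).2) = fc 0 := rfl
                have e1 : ((fc (j+1)).1, (fc (j+1)).2) = fc (j+1) := rfl
                rw [← e0, ← e1, hcontra]
              have := hinj 0 (j+1) (by omega) (by omega) he
              omega
            exact (get2_set2_ne b (fc 0).1 (fc 0).2 (fc (j+1)).1 (fc (j+1)).2 3 hne2).symm
          · rfl)
      have hbody : (fun (bd : List (List Int)) (j : Nat) =>
            if (M0 :: Mt).getD (j + 1) 0 = 3
              then pvSet2 bd (fc (j+1)).1 (fc (j+1)).2 3 else bd)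
          = (fun bd j => if Mt.getD j 0 = 3
              then pvSet2 bd ((fun j => fc (j+1)) j).1 ((fun j => fc (j+1)) j).2 3 else bd) := by
        funext bd j
        rw [hMt]
      have hgoal1 : (List.range m).foldl
          (fun bd j => if (M0 :: Mt).getD (Nat.succ j) 0 = 3
            then pvSet2 bd (fc (Nat.succ j)).1 (fc (Nat.succ j)).2 3 else bd) b0
          = pvWAll b0 ((List.range m).map fun j => fc (j + 1)) Mt := by
        rw [show (fun (bd : List (List Int)) (j : Nat) =>
            if (M0 :: Mt).getD (Nat.succ j) 0 = 3
              then pvSet2 bd (fc (Nat.succ j)).1 (fc (Nat.succ j)).2 3 else bd)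
          = (fun bd j => if Mt.getD j 0 = 3
              then pvSet2 bd ((fun j => fc (j+1)) j).1 ((fun j => fc (j+1)) j).2 3 else bd)
          from by funext bd j; rw [show Nat.succ j = j + 1 from rfl, hMt]]
        exact hstep
      rw [hgoal1]
      have hfinal : pvWAll b (fc 0 :: (List.range m).map fun j => fc (j+1)) (M0 :: Mt)
          = pvWAll b0 ((List.range m).map fun j => fc (j+1)) Mt := by
        cases hfc0 : fc 0 with
        | mk r c =>
          have e : pvWAll b ((r, c) :: (List.range m).map fun j => fc (j+1)) (M0 :: Mt)
              = pvWAll (pvSet2 b r c M0) ((List.range m).map fun j => fc (j+1)) Mt := rfl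
          rw [e, hb0, hM0]
          split_ifs with h3
          · rw [h3, hfc0]
          · have hrd := hread 0 (by omega) (by rw [hM0]; exact h3)
            rw [hM0] at hrd
            rw [hrd, hfc0]
            rw [set2_self b r c (by have := hin 0 (by omega); rwa [hfc0] at this)]
      rw [← hfinal]
      rfl

theorem pvCore (fc : Nat → Nat × Nat) (m : Nat) (b : List (List Int))
    (hinj : ∀ j1 j2, j1 < m → j2 < m → fc j1 = fc j2 → j1 = j2)
    (hib : ∀ j, j < m → pvInB b (fc j)) :
    ((List.range (checkAndMarkRow ((List.range m).map (fun h => pvGet2 b (fc h).1 (fc h).2))).length).foldl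
       (fun bd j =>
         if (checkAndMarkRow ((List.range m).map (fun h => pvGet2 b (fc h).1 (fc h).2))).getD j 0 = 3
          then pvSet2 bd (fc j).1 (fc j).2 3 else bd) b)
    = pvScanGo true ((List.range m).map fc).reverse
        (pvScanGo false ((List.range m).map fc) b false 0) false 0 := by
  set C : List (Nat × Nat) := (List.range m).map fc with hC
  have hlC : C.length = m := by rw [hC, List.length_map, List.length_range]
  have hnd : C.Nodup := by
    rw [hC]
    exact List.Nodup.map_on
      (fun x hx y hy he => hinj x y (List.mem_range.mp hx) (List.mem_range.mp hy) he)
      List.nodup_range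
  have hinC : ∀ p ∈ C, pvInB b p := by
    intro p hp
    rw [hC] at hp
    obtain ⟨j, hj, rfl⟩ := List.mem_map.mp hp
    exact hib j (List.mem_range.mp hj)
  have hdm : C.map (fun p => pvGet2 b p.1 p.2)
      = (List.range m).map (fun h => pvGet2 b (fc h).1 (fc h).2) := by
    rw [hC, List.map_map]
    rfl
  set d : List Int := (List.range m).map (fun h => pvGet2 b (fc h).1 (fc h).2) with hd
  have hld : d.length = m := by rw [hd, List.length_map, List.length_range]
  set f1 : List Int := pvSP false d false 0 with hf1
  have hlf1 : f1.length = m := by rw [hf1, pvSP_length]; exact hld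
  set g : List Int := pvSP true f1.reverse false 0 with hg
  have hlg : g.length = m := by
    rw [hg, pvSP_length, List.length_reverse]; exact hlf1
  have hM : checkAndMarkRow d = g.reverse := by
    rw [pvMark_eq d, hg, hf1, hd]
  have hlM : (checkAndMarkRow d).length = m := by rw [hM, List.length_reverse]; exact hlg
  -- LHS
  have hdj : ∀ j, j < m → d.getD j 0 = pvGet2 b (fc j).1 (fc j).2 := by
    intro j hj
    rw [hd, List.getD_eq_getElem?_getD, List.getElem?_map,
      List.getElem?_range hj]
    rfl
  have hlhs := wb_loop m fc (checkAndMarkRow d) b hlM hinj hib (by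
    intro j hj hne
    have := f2_getD d (checkAndMarkRow d) (mark_keep3 d) j (by omega)
    rcases this with h | h
    · rw [h, hdj j hj]
    · exact absurd h hne)
  rw [hlM, hlhs, ← hC]
  -- RHS
  rw [scan_eq_wAll false C b false 0 hnd hinC, hdm, ← hf1]
  set b1 : List (List Int) := pvWAll b C f1 with hb1
  have hin1 : ∀ p ∈ C.reverse, pvInB b1 p := by
    intro p hp
    rw [hb1, InB_wAll]
    exact hinC p (List.mem_reverse.mp hp)
  rw [scan_eq_wAll true C.reverse b1 false 0 (List.nodup_reverse.mpr hnd) hin1]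
  have hmapb1 : C.reverse.map (fun p => pvGet2 b1 p.1 p.2) = f1.reverse := by
    rw [List.map_reverse]
    congr 1
    rw [hb1]
    exact extract_wAll C f1 b hnd (by omega) hinC
  rw [hmapb1, ← hg]
  have hrev := wAll_reverse C g.reverse b1 hnd (by rw [List.length_reverse]; omega)
  rw [List.reverse_reverse] at hrev
  rw [hrev, hb1]
  rw [wAll_overwrite C f1 g.reverse b hnd (by omega) (by rw [List.length_reverse]; omega)]
  rw [hM]

def pvInv (n : Nat) (b : List (List Int)) : Prop :=
  b.length = n ∧ ∀ r, r < n → n ≤ (b.getD r []).length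

theorem len_scan (rs : Bool) : ∀ (C : List (Nat × Nat)) (b : List (List Int))
    (a : Bool) (w : Nat), (pvScanGo rs C b a w).length = b.length := by
  intro C
  induction C with
  | nil => intro b a w; rfl
  | cons q t ih =>
    intro b a w
    cases q with
    | mk r c =>
      simp only [pvScanGo]
      split_ifs <;> rw [ih] <;> try rw [len_set2]

theorem rowlen_scan (rs : Bool) : ∀ (C : List (Nat × Nat)) (b : List (List Int))
    (a : Bool) (w : Nat) (r' : Nat),
    ((pvScanGo rs C b a w).getD r' []).length = (b.getD r' []).length := by
  intro C
  induction C with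
  | nil => intro b a w r'; rfl
  | cons q t ih =>
    intro b a w r'
    cases q with
    | mk r c =>
      simp only [pvScanGo]
      split_ifs <;> rw [ih] <;> try rw [rowlen_set2]

theorem inv_scan (rs : Bool) (n : Nat) (C : List (Nat × Nat)) (b : List (List Int))
    (a : Bool) (w : Nat) (h : pvInv n b) : pvInv n (pvScanGo rs C b a w) := by
  obtain ⟨h1, h2⟩ := h
  refine ⟨by rw [len_scan, h1], fun r hr => ?_⟩
  rw [rowlen_scan]
  exact h2 r hr

theorem bounds1 (n : Nat) (i : Int) (j : Nat) (hj : j < n - i.natAbs) :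
    (max 0 (-i)).toNat + j < n ∧ (max 0 i).toNat + j < n := by
  by_cases hi : (0:Int) ≤ i
  · have e1 : max 0 (-i) = 0 := max_eq_left (by omega)
    have e2 : max 0 i = i := max_eq_right hi
    rw [e1, e2]
    constructor <;> omega
  · have e1 : max 0 (-i) = -i := max_eq_right (by omega)
    have e2 : max 0 i = 0 := max_eq_left (by omega)
    rw [e1, e2]
    constructor <;> omega

theorem bounds2 (n : Nat) (i : Int) (j : Nat) (hj : j < n - i.natAbs) :
    (max 0 i).toNat + j < n ∧ ((min ((n:Int)+i) (n:Int)) - (j:Int) - 1).toNat < n := by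
  by_cases hi : (0:Int) ≤ i
  · have e2 : max 0 i = i := max_eq_right hi
    have e3 : min ((n:Int)+i) (n:Int) = (n:Int) := min_eq_right (by omega)
    rw [e2, e3]
    constructor <;> omega
  · have e2 : max 0 i = 0 := max_eq_left (by omega)
    have e3 : min ((n:Int)+i) (n:Int) = (n:Int)+i := min_eq_left (by omega)
    rw [e2, e3]
    constructor <;> omega

theorem step1_eq (n : Nat) (b : List (List Int)) (i : Int) (hinv : pvInv n b) :
    pvStepA1 n b i = pvStepB1 n b i := by
  obtain ⟨hl, hrow⟩ := hinv
  have h := pvCore (fun h => ((max 0 (-i)).toNat + h, (max 0 i).toNat + h))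
    (n - i.natAbs) b
    (by
      intro j1 j2 _ _ he
      have := congrArg Prod.fst he
      simp only at this
      omega)
    (by
      intro j hj
      obtain ⟨hb1, hb2⟩ := bounds1 n i j hj
      constructor
      · simp only; omega
      · simp only
        have := hrow ((max 0 (-i)).toNat + j) hb1
        omega)
  simpa only [pvStepA1, pvStepB1, pvCoords1] using h

theorem step2_eq (n : Nat) (b : List (List Int)) (i : Int) (hinv : pvInv n b) :
    pvStepA2 n b i = pvStepB2 n b i := by
  obtain ⟨hl, hrow⟩ := hinv
  have h := pvCore
    (fun h => ((max 0 i).toNat + h, ((min ((n:Int)+i) (n:Int)) - (h:Int) - 1).toNat))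
    (n - i.natAbs) b
    (by
      intro j1 j2 _ _ he
      have := congrArg Prod.fst he
      simp only at this
      omega)
    (by
      intro j hj
      obtain ⟨hb1, hb2⟩ := bounds2 n i j hj
      constructor
      · simp only; omega
      · simp only
        have := hrow ((max 0 i).toNat + j) hb1
        omega)
  simpa only [pvStepA2, pvStepB2, pvCoords2] using h

theorem inv_stepB1 (n : Nat) (b : List (List Int)) (i : Int) (h : pvInv n b) :
    pvInv n (pvStepB1 n b i) := by
  simp only [pvStepB1]
  exact inv_scan _ _ _ _ _ _ (inv_scan _ _ _ _ _ _ h)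

theorem inv_stepB2 (n : Nat) (b : List (List Int)) (i : Int) (h : pvInv n b) :
    pvInv n (pvStepB2 n b i) := by
  simp only [pvStepB2]
  exact inv_scan _ _ _ _ _ _ (inv_scan _ _ _ _ _ _ h)

theorem fold_congr_inv (n : Nat)
    (f g : List (List Int) → Int → List (List Int))
    (hfg : ∀ b i, pvInv n b → f b i = g b i)
    (hg : ∀ b i, pvInv n b → pvInv n (g b i)) :
    ∀ (L : List Int) (b : List (List Int)), pvInv n b →
    L.foldl f b = L.foldl g b ∧ pvInv n (L.foldl g b) := by
  intro L
  induction L with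
  | nil => intro b hb; exact ⟨rfl, hb⟩
  | cons x t ih =>
    intro b hb
    simp only [List.foldl_cons]
    rw [hfg b x hb]
    exact ih (g b x) (hg b x hb)

theorem markDiagonals_spec : Claim_equal_markDiagonals := by
  intro board _hdom hpre
  unfold Spec_markDiagonals
  simp only [markDiagonals, markDiagonals_alt]
  set n := board.length with hn
  have hinv : pvInv n board := by
    refine ⟨rfl, fun r hr => ?_⟩
    have hmem : board.getD r [] ∈ board := by
      rw [List.getD_eq_getElem?_getD, List.getElem?_eq_getElem hr]
      exact List.getElem_mem hr
    exact hpre _ hmem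
  have h1 := fold_congr_inv n (pvStepA1 n) (pvStepB1 n)
    (fun b i hb => step1_eq n b i hb) (fun b i hb => inv_stepB1 n b i hb)
    (PySem.List.pyRange (1 - (n:Int)) n 1) board hinv
  rw [h1.1]
  have h2 := fold_congr_inv n (pvStepA2 n) (pvStepB2 n)
    (fun b i hb => step2_eq n b i hb) (fun b i hb => inv_stepB2 n b i hb)
    (PySem.List.pyRange (1 - (n:Int)) n 1)
    ((PySem.List.pyRange (1 - (n:Int)) n 1).foldl (pvStepB1 n) board) h1.2
  rw [h2.1]
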